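-- pv_equiv track=rewrite | github.com/akaasia91-cmd/DutySolution | app.py | _n_block_gap_penalty
-- ===== SOURCE A (Python) =====
-- def _n_block_gap_penalty(sched: dict, n: int) -> int:
--     """N 블록 사이 달력 간격이 7일 미만이면 가산 — 'N 블록 간격 부족' 경고 감소 유도."""
--     ns = sched.get(n, {})
--     n_days = sorted(d for d, s in ns.items() if s == 'N')
--     if len(n_days) < 2:
--         return 0
--     blocks = []
--     blk = [n_days[0]]
--     for d in n_days[1:]:
--         if d == blk[-1] + 1:
--             blk.append(d)
--         else:
--             blocks.append(blk)
--             blk = [d]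
--     blocks.append(blk)
--     p = 0
--     for i in range(len(blocks) - 1):
--         gap = blocks[i + 1][0] - blocks[i][-1] - 1
--         if gap < 7:
--             p += (7 - gap) * 5
--     return p
-- ===== SOURCE B (Python) =====
-- def _n_block_gap_penalty(sched: dict, n: int) -> int:
--     """Single adjacent-pair scan over the sorted N-days; no intermediate block list."""
--     days = sorted(d for d, s in sched.get(n, {}).items() if s == 'N')
--     if len(days) < 2:
--         return 0
--     p = 0
--     for a, b in zip(days, days[1:]):
--         diff = b - a
--         if diff > 1 and diff - 1 < 7:
--             p += (7 - (diff - 1)) * 5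
--     return p
-- ===== Notes on version B (the rewrite author's own statement) =====
-- stated objective: simpler
-- what changed: Instead of materialising the list of consecutive-day blocks and then indexing adjacent block pairs, B folds the grouping into one scan over adjacent sorted-day pairs: a pair with difference > 1 is exactly a block boundary and its gap is diff - 1.
import Mathlib
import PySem

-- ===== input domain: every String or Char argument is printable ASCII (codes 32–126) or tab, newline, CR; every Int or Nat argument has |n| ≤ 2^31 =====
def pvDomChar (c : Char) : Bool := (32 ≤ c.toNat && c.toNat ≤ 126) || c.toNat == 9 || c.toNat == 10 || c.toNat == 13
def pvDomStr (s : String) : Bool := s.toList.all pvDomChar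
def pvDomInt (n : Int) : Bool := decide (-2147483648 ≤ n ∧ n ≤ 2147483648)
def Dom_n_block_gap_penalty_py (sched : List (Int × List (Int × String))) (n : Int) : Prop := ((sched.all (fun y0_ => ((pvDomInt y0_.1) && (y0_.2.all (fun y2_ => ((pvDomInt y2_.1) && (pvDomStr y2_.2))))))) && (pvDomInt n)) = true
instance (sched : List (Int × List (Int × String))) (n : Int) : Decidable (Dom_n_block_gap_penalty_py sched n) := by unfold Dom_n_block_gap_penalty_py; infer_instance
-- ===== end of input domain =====

-- B replaces A's intermediate block list by a single scan over adjacent sorted-day pairs (objective: simpler).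

-- ===== PORT A =====
-- A: sort the N-days, group them into consecutive blocks, then index adjacent block pairs.
def n_block_gap_penalty_py (sched : List (Int × List (Int × String))) (n : Int) : Int :=
  let ns := (PySem.Dict.ofList sched).getD n []
  let n_days := PySem.List.sorted
      (((PySem.Dict.ofList ns).items.filter (fun p => p.2 == "N")).map Prod.fst)
      (fun x => x) false
  if n_days.length < 2 then 0
  else
    let st := (PySem.List.slice n_days (some 1) none).foldl
        (fun (acc : List (List Int) × List Int) d =>
          if d = PySem.List.pyGetD acc.2 (-1) 0 + 1 then (acc.1, acc.2 ++ [d])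
          else (acc.1 ++ [acc.2], [d]))
        ([], [PySem.List.pyGetD n_days 0 0])
    let blocks := st.1 ++ [st.2]
    (PySem.List.pyRange 0 (PySem.List.len blocks - 1) 1).foldl
      (fun p i =>
        let gap := PySem.List.pyGetD (PySem.List.pyGetD blocks (i + 1) []) 0 0
                   - PySem.List.pyGetD (PySem.List.pyGetD blocks i []) (-1) 0 - 1
        if gap < 7 then p + (7 - gap) * 5 else p)
      0

-- ===== PORT B =====
-- B: one pass over zip(days, days[1:]); a pair with difference > 1 is a block boundary.
def n_block_gap_penalty_py_alt (sched : List (Int × List (Int × String))) (n : Int) : Int :=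
  let days := PySem.List.sorted
      ((((PySem.Dict.ofList ((PySem.Dict.ofList sched).getD n [])).items.filter
          (fun p => p.2 == "N")).map Prod.fst))
      (fun x => x) false
  if days.length < 2 then 0
  else
    (days.zip (PySem.List.slice days (some 1) none)).foldl
      (fun p ab =>
        if ab.2 - ab.1 > 1 ∧ ab.2 - ab.1 - 1 < 7 then p + (7 - (ab.2 - ab.1 - 1)) * 5 else p)
      0

-- ===== PRECONDITION & SPEC =====
def Spec_n_block_gap_penalty_py (sched : List (Int × List (Int × String))) (n : Int) (out : Int) : Prop := out = n_block_gap_penalty_py_alt sched n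
instance (sched : List (Int × List (Int × String))) (n : Int) (out : Int) : Decidable (Spec_n_block_gap_penalty_py sched n out) := by unfold Spec_n_block_gap_penalty_py; infer_instance

-- ===== CLAIM (what is proved, stated in full; the proofs are below) =====
def Claim_equal_n_block_gap_penalty_py : Prop := ∀ (sched : List (Int × List (Int × String))) (n : Int), Dom_n_block_gap_penalty_py sched n → Spec_n_block_gap_penalty_py sched n (n_block_gap_penalty_py sched n)

-- ===== LEMMAS AND PROOFS =====

-- A's grouping loop, as a structural recursion (proof helper).
def pvGroupGo : List Int → List Int → List (List Int)
  | blk, [] => [blk]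
  | blk, d :: rest =>
    if d = PySem.List.pyGetD blk (-1) 0 + 1 then pvGroupGo (blk ++ [d]) rest
    else blk :: pvGroupGo [d] rest

-- sum of g over adjacent pairs of a list (proof helper).
def pvPairSum (g : α → α → Int) : List α → Int
  | x :: y :: r => g x y + pvPairSum g (y :: r)
  | _ => 0

-- A's per-pair contribution between two blocks.
def pvGA (b1 b2 : List Int) : Int :=
  if PySem.List.pyGetD b2 0 0 - PySem.List.pyGetD b1 (-1) 0 - 1 < 7 then
    (7 - (PySem.List.pyGetD b2 0 0 - PySem.List.pyGetD b1 (-1) 0 - 1)) * 5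
  else 0

-- B's per-pair contribution between two days.
def pvGB (a b : Int) : Int :=
  if b - a > 1 ∧ b - a - 1 < 7 then (7 - (b - a - 1)) * 5 else 0

theorem pvFoldl_group (l : List Int) :
    ∀ (bs : List (List Int)) (blk : List Int),
      (l.foldl
        (fun (acc : List (List Int) × List Int) d =>
          if d = PySem.List.pyGetD acc.2 (-1) 0 + 1 then (acc.1, acc.2 ++ [d])
          else (acc.1 ++ [acc.2], [d])) (bs, blk)).1
      ++ [(l.foldl
        (fun (acc : List (List Int) × List Int) d =>
          if d = PySem.List.pyGetD acc.2 (-1) 0 + 1 then (acc.1, acc.2 ++ [d])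
          else (acc.1 ++ [acc.2], [d])) (bs, blk)).2]
      = bs ++ pvGroupGo blk l := by
  induction l with
  | nil => intro bs blk; simp [pvGroupGo]
  | cons d rest ih =>
    intro bs blk
    simp only [List.foldl_cons, pvGroupGo]
    by_cases h : d = PySem.List.pyGetD blk (-1) 0 + 1
    · simp [h, ih]
    · simp [h, ih]

theorem pvGroupGo_head (l : List Int) :
    ∀ blk : List Int, ∃ t s, pvGroupGo blk l = (blk ++ t) :: s := by
  induction l with
  | nil => intro blk; exact ⟨[], [], by simp [pvGroupGo]⟩
  | cons d rest ih =>
    intro blk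
    by_cases h : d = PySem.List.pyGetD blk (-1) 0 + 1
    · obtain ⟨t, s, hts⟩ := ih (blk ++ [d])
      refine ⟨[d] ++ t, s, ?_⟩
      rw [pvGroupGo, if_pos h]
      simpa [List.append_assoc] using hts
    · exact ⟨[], pvGroupGo [d] rest, by simp [pvGroupGo, h]⟩

-- a foldl adding a per-pair contribution is pvPairSum
theorem pvFoldl_zip_pairSum {α : Type} (g : α → α → Int) (xs : List α) :
    ∀ c : Int,
      (xs.zip xs.tail).foldl (fun p ab => p + g ab.1 ab.2) c = c + pvPairSum g xs := by
  induction xs with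
  | nil => intro c; simp [pvPairSum]
  | cons x t ih =>
    intro c
    cases t with
    | nil => simp [pvPairSum]
    | cons y r =>
      simp only [List.tail_cons, List.zip_cons_cons, List.foldl_cons]
      rw [show (y :: r).zip r = (y :: r).zip (y :: r).tail from rfl, ih, pvPairSum]
      ring

-- core: A's pairwise block penalty equals B's adjacent-day penalty, on a strictly increasing chain
theorem pvGroup_pen (l : List Int) :
    ∀ (c : Int) (t : List Int), List.IsChain (· < ·) (c :: l) →
      pvPairSum pvGA (pvGroupGo (t ++ [c]) l) = pvPairSum pvGB (c :: l) := by
  induction l with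
  | nil => intro c t _; simp [pvGroupGo, pvPairSum]
  | cons d rest ih =>
    intro c t hch
    rw [List.isChain_cons_cons] at hch
    obtain ⟨hcd, hch⟩ := hch
    have hlast : PySem.List.pyGetD (t ++ [c]) (-1) 0 = c :=
      PySem.List.pyGetD_neg_one_append_singleton t c 0
    by_cases h : d = c + 1
    · rw [pvGroupGo, if_pos (by rw [hlast]; exact h)]
      have hih := ih d (t ++ [c]) hch
      rw [hih]
      have : pvGB c d = 0 := by unfold pvGB; simp [h]
      simp only [pvPairSum, this]
      omega
    · rw [pvGroupGo, if_neg (by rw [hlast]; exact h)]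
      obtain ⟨t', s', hts⟩ := pvGroupGo_head rest [d]
      have hih := ih d [] hch
      simp only [List.nil_append] at hih
      rw [hts] at hih ⊢
      simp only [List.singleton_append] at hih ⊢
      have hga : pvGA (t ++ [c]) (d :: t') = pvGB c d := by
        unfold pvGA pvGB
        rw [hlast]
        simp only [PySem.List.pyGetD_zero_cons]
        have h2 : d - c > 1 := by omega
        simp [h2]
      simp only [pvPairSum] at hih ⊢
      rw [hga, hih]

-- the pyRange-indexed penalty loop over blocks is the adjacent-pair sum over blocks
theorem pvPen_loop_eq (bs : List (List Int)) :
    (PySem.List.pyRange 0 (PySem.List.len bs - 1) 1).foldl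
      (fun p i =>
        let gap := PySem.List.pyGetD (PySem.List.pyGetD bs (i + 1) []) 0 0
                   - PySem.List.pyGetD (PySem.List.pyGetD bs i []) (-1) 0 - 1
        if gap < 7 then p + (7 - gap) * 5 else p)
      0 = pvPairSum pvGA bs := by
  cases bs with
  | nil =>
    rw [show PySem.List.len ([] : List (List Int)) - 1 = -1 by simp [PySem.List.len_eq]]
    rw [PySem.List.pyRange_one_eq_nil (by norm_num)]
    rfl
  | cons b bs' =>
    have hlen : PySem.List.len (b :: bs') - 1 = (((b :: bs').zip (b :: bs').tail).length : Int) := by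
      simp [PySem.List.len_eq, List.length_zip]
    rw [hlen]
    rw [PySem.List.foldl_congr_mem _ _
        (fun (p : Int) (j : Int) =>
          let gap := PySem.List.pyGetD
              (PySem.List.pyGetD ((b :: bs').zip (b :: bs').tail) j ([], [])).2 0 0
            - PySem.List.pyGetD
              (PySem.List.pyGetD ((b :: bs').zip (b :: bs').tail) j ([], [])).1 (-1) 0 - 1
          if gap < 7 then p + (7 - gap) * 5 else p) 0 ?_]
    · rw [PySem.List.foldl_pyRange_zero_pyGetD' ((b :: bs').zip (b :: bs').tail)
          (([], []) : List Int × List Int)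
          (fun (q : Int) (ab : List Int × List Int) =>
            let gap := PySem.List.pyGetD ab.2 0 0 - PySem.List.pyGetD ab.1 (-1) 0 - 1
            if gap < 7 then q + (7 - gap) * 5 else q) 0]
      rw [show (fun (q : Int) (ab : List Int × List Int) =>
            let gap := PySem.List.pyGetD ab.2 0 0 - PySem.List.pyGetD ab.1 (-1) 0 - 1
            if gap < 7 then q + (7 - gap) * 5 else q)
          = fun q ab => q + pvGA ab.1 ab.2 by
        funext q ab
        show (if PySem.List.pyGetD ab.2 0 0 - PySem.List.pyGetD ab.1 (-1) 0 - 1 < 7 then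
            q + (7 - (PySem.List.pyGetD ab.2 0 0 - PySem.List.pyGetD ab.1 (-1) 0 - 1)) * 5 else q)
          = q + pvGA ab.1 ab.2
        unfold pvGA
        split_ifs <;> omega]
      simpa using pvFoldl_zip_pairSum pvGA (b :: bs') 0
    · intro acc i hi
      rw [PySem.List.mem_pyRange_one] at hi
      beta_reduce
      have hi1 : i < (((b :: bs').zip (b :: bs').tail).length : Int) := hi.2
      have hz : PySem.List.pyGetD ((b :: bs').zip (b :: bs').tail) i ([], [])
          = ((b :: bs')[i.toNat]'(by simp at hi1 ⊢; omega),
             (b :: bs')[i.toNat + 1]'(by simp at hi1 ⊢; omega)) := by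
        rw [PySem.List.pyGetD_eq_getElem _ _ hi.1 hi1, List.getElem_zip]
        simp
      rw [hz]
      have h1 : PySem.List.pyGetD (b :: bs') i [] = (b :: bs')[i.toNat]'(by simp at hi1 ⊢; omega) :=
        PySem.List.pyGetD_eq_getElem _ _ hi.1 (by simp at hi1 ⊢; omega)
      have h2 : PySem.List.pyGetD (b :: bs') (i + 1) []
          = (b :: bs')[i.toNat + 1]'(by simp at hi1 ⊢; omega) := by
        rw [PySem.List.pyGetD_eq_getElem _ _ (by omega) (by simp at hi1 ⊢; omega)]
        congr 1
        omega
      rw [h1, h2]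

-- A's and B's branch bodies agree on any strictly increasing day list
theorem pvDays (days : List Int) (hpw : days.Pairwise (· < ·)) :
    (if days.length < 2 then (0 : Int) else
      let st := (PySem.List.slice days (some 1) none).foldl
          (fun (acc : List (List Int) × List Int) d =>
            if d = PySem.List.pyGetD acc.2 (-1) 0 + 1 then (acc.1, acc.2 ++ [d])
            else (acc.1 ++ [acc.2], [d]))
          ([], [PySem.List.pyGetD days 0 0])
      let blocks := st.1 ++ [st.2]
      (PySem.List.pyRange 0 (PySem.List.len blocks - 1) 1).foldl
        (fun p i =>
          let gap := PySem.List.pyGetD (PySem.List.pyGetD blocks (i + 1) []) 0 0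
                     - PySem.List.pyGetD (PySem.List.pyGetD blocks i []) (-1) 0 - 1
          if gap < 7 then p + (7 - gap) * 5 else p) 0)
    = (if days.length < 2 then 0 else
      (days.zip (PySem.List.slice days (some 1) none)).foldl
        (fun p ab =>
          if ab.2 - ab.1 > 1 ∧ ab.2 - ab.1 - 1 < 7 then p + (7 - (ab.2 - ab.1 - 1)) * 5 else p)
        0) := by
  by_cases hl : days.length < 2
  · simp [hl]
  · cases days with
    | nil => simp at hl
    | cons d0 rest =>
      simp only [if_neg hl, PySem.List.slice_from_one, List.tail_cons,
        PySem.List.pyGetD_zero_cons]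
      rw [pvFoldl_group rest [] [d0], List.nil_append, pvPen_loop_eq]
      rw [show (fun (p : Int) (ab : Int × Int) =>
            if ab.2 - ab.1 > 1 ∧ ab.2 - ab.1 - 1 < 7 then p + (7 - (ab.2 - ab.1 - 1)) * 5 else p)
          = fun p ab => p + pvGB ab.1 ab.2 by
        funext p ab
        unfold pvGB
        split_ifs <;> omega]
      rw [show ((d0 :: rest).zip rest) = ((d0 :: rest).zip (d0 :: rest).tail) from rfl]
      rw [pvFoldl_zip_pairSum pvGB (d0 :: rest) 0, zero_add]
      have := pvGroup_pen rest d0 [] hpw.isChain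
      simpa using this

-- ===== VERDICT (by name: the statement is the Claim_ definition above) =====
theorem n_block_gap_penalty_py_spec : Claim_equal_n_block_gap_penalty_py := by
  intro sched n _
  unfold Spec_n_block_gap_penalty_py
  have hkeys : ((PySem.Dict.ofList ((PySem.Dict.ofList sched).getD n [])).items.map
      Prod.fst).Nodup := by
    have := PySem.Dict.nodup_keys_ofList (ν := String) ((PySem.Dict.ofList sched).getD n [])
    simpa [PySem.Dict.keys] using this
  have hnd : (((PySem.Dict.ofList ((PySem.Dict.ofList sched).getD n [])).items.filter
      (fun p => p.2 == "N")).map Prod.fst).Nodup :=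
    hkeys.sublist (List.filter_sublist.map Prod.fst)
  have hpw : (PySem.List.sorted
      (((PySem.Dict.ofList ((PySem.Dict.ofList sched).getD n [])).items.filter
        (fun p => p.2 == "N")).map Prod.fst) (fun x => x) false).Pairwise (· < ·) := by
    have hle := PySem.List.sorted_pairwise
      (((PySem.Dict.ofList ((PySem.Dict.ofList sched).getD n [])).items.filter
        (fun p => p.2 == "N")).map Prod.fst) (fun x => x)
    have hnds := ((PySem.List.sorted_perm _ (fun x : Int => x) false).nodup_iff).mpr hnd
    exact (hle.and hnds).imp (fun h => lt_of_le_of_ne h.1 h.2)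
  exact pvDays _ hpw
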